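-- pv_equiv track=rewrite | github.com/facucarmo/Algoritmos | calculadora.py | usar_la_fuerza
-- ===== SOURCE A (Python) =====
-- def usar_la_fuerza(mochila, cantidad=0):
--     """
--     Función recursiva que saca objetos de la mochila hasta encontrar un sable de luz,
--     o hasta que no haya más objetos. Devuelve una tupla (encontrado, cantidad de objetos sacados).
--     """
--     if len(mochila) == 0:
--         # Caso base: mochila vacía, no se encontró el sable
--         return False, cantidad
--
--     objeto = mochila[0]
--     cantidad += 1
--
--     if objeto == "sable de luz":
--         # Se encontró el sable
--         return True, cantidad
--     else:
--         # No es el sable, seguir buscando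
--         return usar_la_fuerza(mochila[1:], cantidad)
-- ===== SOURCE B (Python) =====
-- def usar_la_fuerza(mochila, cantidad=0):
--     try:
--         i = mochila.index("sable de luz")
--         return True, cantidad + i + 1
--     except ValueError:
--         return False, cantidad + len(mochila)
-- ===== Notes on version B (the rewrite author's own statement) =====
-- stated objective: faster
-- what changed: Replaced the recursive tail-slicing scan (each step copies the rest of the list) by a single list.index lookup with arithmetic on the found position (or len on failure).
import Mathlib
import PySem

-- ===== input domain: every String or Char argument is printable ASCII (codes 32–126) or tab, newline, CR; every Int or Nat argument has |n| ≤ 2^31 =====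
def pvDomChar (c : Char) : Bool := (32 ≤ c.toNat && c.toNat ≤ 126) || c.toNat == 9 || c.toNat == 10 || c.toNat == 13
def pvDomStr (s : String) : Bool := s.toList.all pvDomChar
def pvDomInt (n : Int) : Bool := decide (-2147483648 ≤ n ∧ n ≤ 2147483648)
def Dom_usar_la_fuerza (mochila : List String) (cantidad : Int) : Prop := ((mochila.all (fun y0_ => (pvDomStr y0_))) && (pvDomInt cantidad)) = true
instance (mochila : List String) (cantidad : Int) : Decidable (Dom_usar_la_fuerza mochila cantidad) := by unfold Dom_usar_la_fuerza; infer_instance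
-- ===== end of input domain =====

-- B replaces A's tail-slicing recursion by a single index lookup plus arithmetic (measured faster).

-- ===== PORT A =====
-- Literal port of A: recursion on the list, slicing off the head, incrementing cantidad.
def usar_la_fuerza (mochila : List String) (cantidad : Int) : Bool × Int :=
  match mochila with
  | [] => (false, cantidad)
  | objeto :: rest =>
    if objeto = "sable de luz" then (true, cantidad + 1)
    else usar_la_fuerza rest (cantidad + 1)

-- ===== PORT B =====
-- Port of B: one index? lookup, arithmetic on the found position.
def usar_la_fuerza_alt (mochila : List String) (cantidad : Int) : Bool × Int :=
  match PySem.List.index? mochila "sable de luz" with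
  | some i => (true, cantidad + (i : Int) + 1)
  | none => (false, cantidad + (mochila.length : Int))

-- ===== PRECONDITION & SPEC =====
def Spec_usar_la_fuerza (mochila : List String) (cantidad : Int) (out : Bool × Int) : Prop := out = usar_la_fuerza_alt mochila cantidad
instance (mochila : List String) (cantidad : Int) (out : Bool × Int) : Decidable (Spec_usar_la_fuerza mochila cantidad out) := by unfold Spec_usar_la_fuerza; infer_instance

-- ===== CLAIM (what is proved, stated in full; the proofs are below) =====
def Claim_equal_usar_la_fuerza : Prop := ∀ (mochila : List String) (cantidad : Int), Dom_usar_la_fuerza mochila cantidad → Spec_usar_la_fuerza mochila cantidad (usar_la_fuerza mochila cantidad)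

-- ===== LEMMAS AND PROOFS =====
theorem ab_eq (mochila : List String) (cantidad : Int) :
    Spec_usar_la_fuerza mochila cantidad (usar_la_fuerza mochila cantidad) := by
  unfold Spec_usar_la_fuerza
  induction mochila generalizing cantidad with
  | nil => simp [usar_la_fuerza, usar_la_fuerza_alt, PySem.List.index?]
  | cons x xs ih =>
    by_cases hx : x = "sable de luz"
    · subst hx
      rw [usar_la_fuerza, if_pos rfl]
      unfold usar_la_fuerza_alt
      rw [PySem.List.index?_cons_self]
      norm_num
    · rw [usar_la_fuerza, if_neg hx, ih]
      unfold usar_la_fuerza_alt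
      rw [PySem.List.index?_cons_of_ne xs hx]
      cases h : PySem.List.index? xs "sable de luz" with
      | none => simp; omega
      | some i => simp; omega

-- ===== VERDICT (by name: the statement is the Claim_ definition above) =====
theorem usar_la_fuerza_spec : Claim_equal_usar_la_fuerza := by
  intro mochila cantidad _
  exact ab_eq mochila cantidad
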